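-- pv_equiv track=rewrite | github.com/mikemartinez99/clover-Seq | code/getcoverage.py | cigarrefcoverage
-- ===== SOURCE A (Python) =====
-- bam_match = 0
--
-- bam_cins = 1
--
-- bam_cdel = 2
--
-- def cigarrefcoverage(cigar):
--     nextsum = 1
--     for curr in cigar:
--         if curr[0] == bam_cins:
--             nextsum += curr[1]
--             pass
--         elif curr[0] == bam_cdel:
--             for i in range(curr[1]):
--                 yield 0
--         elif curr[0] == bam_match:
--             for i in range(curr[1]):
--                 yield nextsum
--                 nextsum = 1
-- ===== SOURCE B (Python) =====
-- def cigarrefcoverage(cigar):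
--     # Stage 1: for each op, the total insertion length carried into it
--     # (insertions add to the carry; a positive-length match consumes it).
--     cigar = list(cigar)
--     carries = []
--     c = 0
--     for op, n in cigar:
--         carries.append(c)
--         if op == 1:
--             c += n
--         elif op == 0 and n > 0:
--             c = 0
--     # Stage 2: emit one block per op from the precomputed carries.
--     for (op, n), c in zip(cigar, carries):
--         if op == 2:
--             yield from [0] * n
--         elif op == 0 and n > 0:
--             yield c + 1
--             yield from [1] * (n - 1)
-- ===== Notes on version B (the rewrite author's own statement) =====
-- stated objective: alternative
-- what changed: Replaces A's single-pass generator with a mutating nextsum counter by two staged passes: pass 1 precomputes, for every op, the insertion carry entering it (insertions add, positive matches consume), pass 2 zips ops with their carries and emits each op's block independently with no state threaded through emission.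
import Mathlib
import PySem

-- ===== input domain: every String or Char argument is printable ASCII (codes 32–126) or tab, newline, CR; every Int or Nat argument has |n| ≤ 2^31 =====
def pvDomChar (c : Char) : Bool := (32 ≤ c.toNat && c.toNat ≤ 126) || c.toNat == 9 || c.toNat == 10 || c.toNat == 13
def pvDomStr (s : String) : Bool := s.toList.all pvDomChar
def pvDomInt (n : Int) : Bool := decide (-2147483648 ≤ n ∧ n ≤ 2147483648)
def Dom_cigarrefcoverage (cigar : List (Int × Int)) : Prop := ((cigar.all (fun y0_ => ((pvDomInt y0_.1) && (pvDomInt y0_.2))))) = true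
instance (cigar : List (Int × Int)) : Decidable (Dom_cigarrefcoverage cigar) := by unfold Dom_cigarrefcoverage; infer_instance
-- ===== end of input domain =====

-- B replaces A's stateful single-pass generator by two staged passes: precompute the
-- insertion carry entering each op, then emit each op's block from the zipped pairs
-- (objective: alternative).


-- ===== PORT A =====
-- A's inner `for i in range(curr[1]): yield nextsum; nextsum = 1` loop:
-- returns (the yielded values, the final nextsum).
def pvAMatchLoop : Int → Nat → (List Int × Int)
  | ns, 0 => ([], ns)
  | ns, k + 1 =>
    let r := pvAMatchLoop 1 k
    (ns :: r.1, r.2)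

def cigarrefcoverageGo : Int → List (Int × Int) → List Int
  | _, [] => []
  | nextsum, curr :: rest =>
    if curr.1 = 1 then cigarrefcoverageGo (nextsum + curr.2) rest
    else if curr.1 = 2 then List.replicate curr.2.toNat 0 ++ cigarrefcoverageGo nextsum rest
    else if curr.1 = 0 then
      let r := pvAMatchLoop nextsum curr.2.toNat
      r.1 ++ cigarrefcoverageGo r.2 rest
    else cigarrefcoverageGo nextsum rest

def cigarrefcoverage (cigar : List (Int × Int)) : List Int :=
  cigarrefcoverageGo 1 cigar

-- ===== PORT B =====
-- stage 1: the insertion carry entering each op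
def pvCarries : Int → List (Int × Int) → List Int
  | _, [] => []
  | c, (op, n) :: rest =>
    c :: pvCarries (if op = 1 then c + n else if op = 0 ∧ 0 < n then 0 else c) rest

-- stage 2: emit one block per (op, carry) pair
def pvEmit : List ((Int × Int) × Int) → List Int
  | [] => []
  | ((op, n), c) :: rest =>
    (if op = 2 then List.replicate n.toNat 0
     else if op = 0 ∧ 0 < n then (c + 1) :: List.replicate (n - 1).toNat 1
     else []) ++ pvEmit rest

def cigarrefcoverage_alt (cigar : List (Int × Int)) : List Int :=
  pvEmit (cigar.zip (pvCarries 0 cigar))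

-- ===== PRECONDITION & SPEC =====
def Spec_cigarrefcoverage (cigar : List (Int × Int)) (out : List Int) : Prop := out = cigarrefcoverage_alt cigar
instance (cigar : List (Int × Int)) (out : List Int) : Decidable (Spec_cigarrefcoverage cigar out) := by unfold Spec_cigarrefcoverage; infer_instance

-- ===== CLAIM (what is proved, stated in full; the proofs are below) =====
def Claim_equal_cigarrefcoverage : Prop := ∀ (cigar : List (Int × Int)), Dom_cigarrefcoverage cigar → Spec_cigarrefcoverage cigar (cigarrefcoverage cigar)

-- ===== LEMMAS AND PROOFS =====
theorem pvAMatchLoop_succ (ns : Int) (k : Nat) :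
    pvAMatchLoop ns (k + 1) = (ns :: List.replicate k 1, 1) := by
  induction k generalizing ns with
  | zero => simp [pvAMatchLoop]
  | succ k ih =>
    show (ns :: (pvAMatchLoop 1 (k + 1)).1, (pvAMatchLoop 1 (k + 1)).2) = _
    rw [ih 1]
    simp [List.replicate_succ]

theorem go_eq (cigar : List (Int × Int)) : ∀ ns : Int,
    cigarrefcoverageGo ns cigar = pvEmit (cigar.zip (pvCarries (ns - 1) cigar)) := by
  induction cigar with
  | nil => intro ns; rfl
  | cons curr rest ih =>
    intro ns
    obtain ⟨op, n⟩ := curr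
    by_cases h1 : op = 1
    · simp [cigarrefcoverageGo, pvCarries, pvEmit, h1, ih]
      have : ns + n - 1 = ns - 1 + n := by ring
      rw [← this]
    · by_cases h2 : op = 2
      · simp [cigarrefcoverageGo, pvCarries, pvEmit, h2, ih]
      · by_cases h0 : op = 0
        · by_cases hn : 0 < n
          · obtain ⟨k, hk⟩ : ∃ k : Nat, n.toNat = k + 1 := ⟨n.toNat - 1, by omega⟩
            have hk1 : (n - 1).toNat = k := by omega
            simp [cigarrefcoverageGo, pvCarries, pvEmit, h0, hn, hk,
              pvAMatchLoop_succ, hk1, ih]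
          · have : n.toNat = 0 := by omega
            simp [cigarrefcoverageGo, pvCarries, pvEmit, h0, hn, this,
              pvAMatchLoop, ih]
        · simp [cigarrefcoverageGo, pvCarries, pvEmit, h1, h2, h0, ih]

-- ===== VERDICT (by name: the statement is the Claim_ definition above) =====
theorem cigarrefcoverage_spec : Claim_equal_cigarrefcoverage := by
  intro cigar _
  unfold Spec_cigarrefcoverage cigarrefcoverage cigarrefcoverage_alt
  simpa using go_eq cigar 1
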